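-- pv_equiv track=rewrite | github.com/Manpreet-2002/finance_research_agent | scripts/update_template_phase_v1.py | replace_scenario_inputs
-- ===== SOURCE A (Python) =====
-- def replace_scenario_inputs(formula: str, target_col: str) -> str:
--     assumption_rows = [20, 21, 22, 23, 24, 25, 26, 27, 28, 29, 30, 31, 32, 37, 38, 39, 40, 41, 42, 43, 44]
--     out = formula
--     for r in assumption_rows:
--         out = out.replace(f"Inputs!C{r}", f"Inputs!{target_col}{r}")
--         out = out.replace(f"Inputs!$C${r}", f"Inputs!${target_col}${r}")
--         out = out.replace(f"'Inputs'!C{r}", f"'Inputs'!{target_col}{r}")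
--         out = out.replace(f"'Inputs'!$C${r}", f"'Inputs'!${target_col}${r}")
--     return out
-- ===== SOURCE B (Python) =====
-- def replace_scenario_inputs(formula: str, target_col: str) -> str:
--     rows = ["20", "21", "22", "23", "24", "25", "26", "27", "28", "29", "30",
--             "31", "32", "37", "38", "39", "40", "41", "42", "43", "44"]
--     pats = []
--     for q in ("", "'"):
--         for d in ("", "$"):
--             for r in rows:
--                 pats.append((f"{q}Inputs{q}!{d}C{d}{r}", f"{q}Inputs{q}!{d}{target_col}{d}{r}"))
--     out = []
--     i = 0
--     n = len(formula)
--     while i < n: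
--         c = formula[i]
--         if c == "I" or c == "'":  # every pattern starts with 'I' or a quote
--             for pat, rep in pats:
--                 if formula.startswith(pat, i):
--                     out.append(rep)
--                     i += len(pat)
--                     break
--             else:
--                 out.append(c)
--                 i += 1
--         else:
--             out.append(c)
--             i += 1
--     return "".join(out)
-- ===== Notes on version B (the rewrite author's own statement) =====
-- stated objective: alternative
-- what changed: Replaces A's 21-row loop of 84 whole-string str.replace passes by one precomputed 84-entry pattern table and a single left-to-right scan of the formula that substitutes the first matching pattern at each position.
-- outside the precondition, e.g. on replace_scenario_inputs('Inputs!C20', '$C$'): A returns 'Inputs!$$C$$20', B returns 'Inputs!$C$20'; on replace_scenario_inputs('Inputs!C20', 'C2'): A returns 'Inputs!C2220', B returns 'Inputs!C220'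
import Mathlib
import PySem

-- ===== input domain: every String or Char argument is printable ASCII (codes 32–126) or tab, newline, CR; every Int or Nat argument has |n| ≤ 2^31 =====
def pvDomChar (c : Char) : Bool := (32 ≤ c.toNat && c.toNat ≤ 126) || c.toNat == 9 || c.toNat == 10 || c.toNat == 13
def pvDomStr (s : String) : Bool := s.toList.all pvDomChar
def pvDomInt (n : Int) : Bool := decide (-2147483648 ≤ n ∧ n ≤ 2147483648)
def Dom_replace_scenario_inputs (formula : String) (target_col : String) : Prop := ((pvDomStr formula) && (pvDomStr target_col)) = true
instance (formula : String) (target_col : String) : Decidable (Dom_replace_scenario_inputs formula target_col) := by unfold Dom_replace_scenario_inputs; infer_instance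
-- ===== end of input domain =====

-- B replaces A's 21 rows × 4 whole-string str.replace passes by one precomputed 84-entry
-- pattern table and a single left-to-right scan of the formula (objective: alternative).

-- ===== PORT A =====
def replace_scenario_inputs (formula : String) (target_col : String) : String :=
  ([20, 21, 22, 23, 24, 25, 26, 27, 28, 29, 30, 31, 32, 37, 38, 39, 40, 41, 42, 43, 44] : List Int).foldl
    (fun out r =>
      let out := PySem.Str.replace out ("Inputs!C" ++ PySem.Int.toStr r) ("Inputs!" ++ target_col ++ PySem.Int.toStr r)
      let out := PySem.Str.replace out ("Inputs!$C$" ++ PySem.Int.toStr r) ("Inputs!$" ++ target_col ++ "$" ++ PySem.Int.toStr r)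
      let out := PySem.Str.replace out ("'Inputs'!C" ++ PySem.Int.toStr r) ("'Inputs'!" ++ target_col ++ PySem.Int.toStr r)
      let out := PySem.Str.replace out ("'Inputs'!$C$" ++ PySem.Int.toStr r) ("'Inputs'!$" ++ target_col ++ "$" ++ PySem.Int.toStr r)
      out)
    formula

-- ===== PORT B =====
-- Source B's row-string list
def pvRowsB : List (List Char) :=
  (["20", "21", "22", "23", "24", "25", "26", "27", "28", "29", "30",
    "31", "32", "37", "38", "39", "40", "41", "42", "43", "44"] : List String).map String.toList

-- the (pattern, replacement) table Source B builds with its three nested loops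
def pvPatsB (tc : List Char) : List (List Char × List Char) :=
  ([[], ['\'']] : List (List Char)).flatMap fun q =>
    ([[], ['$']] : List (List Char)).flatMap fun d =>
      pvRowsB.map fun r =>
        (q ++ "Inputs".toList ++ q ++ ['!'] ++ d ++ ['C'] ++ d ++ r,
         q ++ "Inputs".toList ++ q ++ ['!'] ++ d ++ tc ++ d ++ r)

-- termination helper for the scanner: every pattern in the table is nonempty
theorem pvPatsB_fst_pos (tc : List Char) (p : List Char × List Char) (hp : p ∈ pvPatsB tc) :
    0 < p.1.length := by
  simp only [pvPatsB, List.mem_flatMap, List.mem_map] at hp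
  obtain ⟨q, -, d, -, r, -, hp⟩ := hp
  have : p.1 = q ++ "Inputs".toList ++ q ++ ['!'] ++ d ++ ['C'] ++ d ++ r := by rw [← hp]
  simp [this]

-- Source B's while loop: at each position whose char can start a pattern ('I' or a quote),
-- substitute the first matching pattern; otherwise copy the char
def pvScanB (tc : List Char) (s : List Char) : List Char :=
  match s with
  | [] => []
  | c :: t =>
    if c = 'I' ∨ c = '\'' then
      match h : (pvPatsB tc).find? (fun p => p.1.isPrefixOf (c :: t)) with
      | some p => p.2 ++ pvScanB tc ((c :: t).drop p.1.length)
      | none => c :: pvScanB tc t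
    else c :: pvScanB tc t
termination_by s.length
decreasing_by
  · have := pvPatsB_fst_pos tc p (List.mem_of_find?_eq_some h)
    simp; omega
  · simp
  · simp

def replace_scenario_inputs_alt (formula : String) (target_col : String) : String :=
  String.ofList (pvScanB target_col.toList formula.toList)

-- ===== PRECONDITION & SPEC =====
-- Pre_ excludes the inputs where target_col contains the letter 'C' while the formula contains a
-- 'C' as well: there a later replace pass of A can rescan text produced by an earlier pass
-- (e.g. target_col = "$C$" turns "Inputs!C20" into "Inputs!$$C$$20"), an unspecified degenerate
-- corner (the target column contains the source column letter itself) where A's cascading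
-- reading and B's single-scan reading are both defensible.
def Pre_replace_scenario_inputs (formula : String) (target_col : String) : Prop :=
  'C' ∉ target_col.toList ∨ 'C' ∉ formula.toList
instance (formula : String) (target_col : String) : Decidable (Pre_replace_scenario_inputs formula target_col) := by unfold Pre_replace_scenario_inputs; infer_instance

def pvWitness_replace_scenario_inputs : String × String :=
  ("='Inputs'!$C$20 + Inputs!C37 - Inputs!C200", "D")

def Spec_replace_scenario_inputs (formula : String) (target_col : String) (out : String) : Prop := out = replace_scenario_inputs_alt formula target_col
instance (formula : String) (target_col : String) (out : String) : Decidable (Spec_replace_scenario_inputs formula target_col out) := by unfold Spec_replace_scenario_inputs; infer_instance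

-- ===== CLAIM (what is proved, stated in full; the proofs are below) =====
def Claim_equal_replace_scenario_inputs : Prop := ∀ (formula : String) (target_col : String), Dom_replace_scenario_inputs formula target_col → Pre_replace_scenario_inputs formula target_col → Spec_replace_scenario_inputs formula target_col (replace_scenario_inputs formula target_col)

-- ===== LEMMAS AND PROOFS =====

-- ---------- generic list helpers ----------

-- `agree u v`: u and v coincide on their common (overlap) prefix
def agree : List Char → List Char → Bool
  | [], _ => true
  | _, [] => true
  | x :: xs, y :: ys => x == y && agree xs ys

theorem agree_of_prefix_append (u v w : List Char) (h : u <+: v ++ w) : agree u v = true := by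
  induction v generalizing u with
  | nil => cases u <;> simp [agree]
  | cons y ys ih =>
    cases u with
    | nil => simp [agree]
    | cons x xs =>
      rw [List.cons_append] at h
      obtain ⟨hxy, htl⟩ := List.cons_prefix_cons.mp h
      simp [agree, hxy, ih xs htl]

theorem agree_getD (u v : List Char) (h : agree u v = true) :
    ∀ i, i < u.length → i < v.length → u.getD i ' ' = v.getD i ' ' := by
  induction u generalizing v with
  | nil => intro i hi; simp at hi
  | cons x xs ih =>
    cases v with
    | nil => intro i _ hi; simp at hi
    | cons y ys =>
      simp only [agree, Bool.and_eq_true, beq_iff_eq] at h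
      intro i hi hi'
      cases i with
      | zero => simpa using h.1
      | succ n =>
        simp only [List.getD_cons_succ]
        exact ih ys h.2 n (by simpa using hi) (by simpa using hi')

theorem getD_append_left (xs ys : List Char) (i : Nat) (hi : i < xs.length) :
    (xs ++ ys).getD i ' ' = xs.getD i ' ' := by
  rw [List.getD_eq_getElem _ _ (by simp; omega), List.getD_eq_getElem _ _ hi,
    List.getElem_append_left hi]

theorem getD_append_right (xs ys : List Char) (i : Nat) (hi : i < ys.length) :
    (xs ++ ys).getD (xs.length + i) ' ' = ys.getD i ' ' := by
  rw [List.getD_eq_getElem _ _ (by simp; omega), List.getD_eq_getElem _ _ hi]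
  rw [List.getElem_append_right (by omega)]
  congr 1
  omega

theorem getD_append_self (xs : List Char) (y : Char) (zs : List Char) :
    (xs ++ y :: zs).getD xs.length ' ' = y := by
  have := getD_append_right xs (y :: zs) 0 (by simp)
  simpa using this

theorem getD_drop (l : List Char) (n i : Nat) (h : n + i < l.length) :
    (l.drop n).getD i ' ' = l.getD (n + i) ' ' := by
  rw [List.getD_eq_getElem _ _ (by simp; omega), List.getD_eq_getElem _ _ h]
  simp

theorem getD_mem (l : List Char) (i : Nat) (h : i < l.length) : l.getD i ' ' ∈ l := by
  rw [List.getD_eq_getElem _ _ h]; exact List.getElem_mem h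

theorem drop_eq_getD_cons (l : List Char) (n : Nat) (h : n < l.length) :
    l.drop n = l.getD n ' ' :: l.drop (n + 1) := by
  rw [List.drop_eq_getElem_cons h, List.getD_eq_getElem _ _ h]

theorem prefix_head_eq (u v : List Char) (h : agree u v = true) (hu : 0 < u.length)
    (hv : 0 < v.length) : u.getD 0 ' ' = v.getD 0 ' ' :=
  agree_getD u v h 0 hu hv

theorem foldl_hom {α β γ : Type} (f : α → β) (l : List γ) (g : α → γ → α) (g' : β → γ → β)
    (s : α) (hg : ∀ s r, f (g s r) = g' (f s) r) : f (l.foldl g s) = l.foldl g' (f s) := by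
  induction l generalizing s with
  | nil => rfl
  | cons r rs ih => simp only [List.foldl_cons, ih, hg]

theorem foldl_flatMap {α β γ : Type} (l : List γ) (h : γ → List β) (step : α → β → α)
    (s : α) : (l.flatMap h).foldl step s = l.foldl (fun s r => (h r).foldl step s) s := by
  induction l generalizing s with
  | nil => rfl
  | cons r rs ih => simp [List.flatMap_cons, List.foldl_append, ih]

-- ---------- the 84 patterns, decidable mismatch tables ----------

def patList : List (List Char) := (pvPatsB []).map Prod.fst

theorem map_fst_pvPatsB (tc : List Char) : (pvPatsB tc).map Prod.fst = patList := rfl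

theorem fst_mem_patList {tc : List Char} {p : List Char × List Char} (hp : p ∈ pvPatsB tc) :
    p.1 ∈ patList := by
  rw [← map_fst_pvPatsB tc]; exact List.mem_map_of_mem hp

-- no pattern b has a (distinct-or-shifted) occurrence of pattern a starting inside it
def tNS : Bool := patList.all fun a => patList.all fun b =>
  (List.range b.length).all fun j =>
    !(b.getD j ' ' == 'I' || b.getD j ' ' == '\'') ||
    ((a == b && j == 0) || !(agree a (b.drop j)))

-- no proper suffix of pattern a is prefix-compatible with any pattern b
def tW : Bool := patList.all fun a => (List.range a.length).all fun n =>
  n == 0 || !(a.getD n ' ' == 'I' || a.getD n ' ' == '\'') ||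
  (patList.all fun b => !(agree (a.drop n) b))

set_option maxHeartbeats 1600000 in
theorem tNS_true : tNS = true := by decide

set_option maxHeartbeats 1600000 in
theorem tW_true : tW = true := by decide

theorem patList_head : ∀ a ∈ patList, a.getD 0 ' ' = 'I' ∨ a.getD 0 ' ' = '\'' := by decide

theorem patList_ne_nil : ∀ a ∈ patList, 0 < a.length := by decide

theorem patList_nodup : patList.Nodup := by decide

theorem NS (a b : List Char) (ha : a ∈ patList) (hb : b ∈ patList) (j : Nat) (hj : j < b.length)
    (hne : ¬(a = b ∧ j = 0)) : agree a (b.drop j) = false := by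
  by_contra hagr
  have hagr : agree a (b.drop j) = true := by
    cases h : agree a (b.drop j) with
    | false => exact absurd h hagr
    | true => rfl
  have hIq : b.getD j ' ' = 'I' ∨ b.getD j ' ' = '\'' := by
    have h0 : a.getD 0 ' ' = b.getD j ' ' := by
      have := prefix_head_eq a (b.drop j) hagr (patList_ne_nil a ha) (by simp; omega)
      rwa [getD_drop b j 0 (by omega), Nat.add_zero] at this
    rcases patList_head a ha with h | h <;> [left; right] <;> rw [← h0, h]
  have htab := tNS_true
  rw [tNS, List.all_eq_true] at htab
  have h1 := htab a ha
  rw [List.all_eq_true] at h1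
  have h2 := h1 b hb
  rw [List.all_eq_true] at h2
  have h3 := h2 j (List.mem_range.mpr hj)
  rcases hIq with h | h <;> simp only [List.getD] at h <;> simp [h, hagr] at h3 <;>
    exact hne h3

theorem WT (a b : List Char) (ha : a ∈ patList) (hb : b ∈ patList) (n : Nat) (h0 : 0 < n)
    (hn : n < a.length) (hI : a.getD n ' ' = 'I' ∨ a.getD n ' ' = '\'') :
    agree (a.drop n) b = false := by
  have htab := tW_true
  rw [tW, List.all_eq_true] at htab
  have h1 := htab a ha
  rw [List.all_eq_true] at h1
  have h2 := h1 n (List.mem_range.mpr hn)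
  have hn0 : (n == 0) = false := by simp; omega
  rcases hI with h | h <;> simp only [List.getD] at h <;>
    simp [hn0, h, List.all_eq_true] at h2 <;> simpa using h2 b hb

-- ---------- the structural scanner repl1 and its relation to Chars.replace ----------

def repl1 (p r : List Char) (s : List Char) : List Char :=
  match s with
  | [] => []
  | c :: t =>
    if p.isPrefixOf (c :: t) then r ++ repl1 p r (t.drop (p.length - 1))
    else c :: repl1 p r t
termination_by s.length
decreasing_by
  · simp
  · simp

theorem replace_go_eq (p r : List Char) (hp : p ≠ []) :
    ∀ fuel (s acc : List Char), s.length ≤ fuel →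
      PySem.Chars.replace.go p r fuel s acc = acc.reverse ++ repl1 p r s := by
  intro fuel
  induction fuel with
  | zero =>
    intro s acc hs
    have : s = [] := by cases s <;> simp_all
    subst this
    simp [PySem.Chars.replace.go, repl1]
  | succ fuel ih =>
    intro s acc hs
    cases s with
    | nil => simp [PySem.Chars.replace.go, repl1]
    | cons c t =>
      rw [PySem.Chars.replace.go]
      by_cases hpre : p.isPrefixOf (c :: t) = true
      · rw [if_pos hpre]
        obtain ⟨k, hk⟩ : ∃ k, p.length = k + 1 := by
          cases p with
          | nil => exact absurd rfl hp
          | cons a b => exact ⟨b.length, by simp⟩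
        have hdrop : (c :: t).drop p.length = t.drop (p.length - 1) := by
          rw [hk]; simp
        have hs' : t.length ≤ fuel := by simp at hs; omega
        rw [hdrop, ih _ _ (by simp; omega)]
        rw [repl1]
        rw [if_pos hpre]
        simp
      · rw [if_neg hpre, ih _ _ (by simp at hs ⊢; omega)]
        rw [repl1]
        rw [if_neg hpre]
        simp

theorem replace_eq_repl1 (s p r : List Char) (hp : p ≠ []) :
    PySem.Chars.replace s p r = repl1 p r s := by
  rw [PySem.Chars.replace, if_neg (by simpa using hp)]
  simpa using replace_go_eq p r hp s.length s [] le_rfl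

theorem repl1_nil (p r : List Char) : repl1 p r [] = [] := by rw [repl1]

theorem repl1_match (p r y : List Char) (hp : p ≠ []) :
    repl1 p r (p ++ y) = r ++ repl1 p r y := by
  cases p with
  | nil => exact absurd rfl hp
  | cons c p' =>
    rw [List.cons_append, repl1, if_pos (by
      rw [List.isPrefixOf_iff_prefix]
      exact ⟨y, by simp⟩)]
    simp [List.drop_left]

theorem repl1_skip (p r : List Char) (x y : List Char)
    (hx : ∀ j, j < x.length → ¬ p <+: (x.drop j ++ y)) :
    repl1 p r (x ++ y) = x ++ repl1 p r y := by
  induction x with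
  | nil => simp
  | cons c x' ih =>
    rw [List.cons_append, repl1, if_neg]
    · rw [ih fun j hj => by simpa using hx (j + 1) (by simpa using hj)]
      rfl
    · rw [List.isPrefixOf_iff_prefix]
      simpa using hx 0 (by simp)

-- ---------- the core mismatch engine ----------

theorem core_mismatch (u v : List Char) (cp : Nat) (hcp : cp < u.length)
    (hC : u.getD cp ' ' = 'C') (hpred : ∀ i, i < cp → ¬ (u.getD i ' ').isDigit)
    (hvC : 'C' ∉ v) (hvlast : (v.getD (v.length - 1) ' ').isDigit)
    (j : Nat) (hj : j < v.length) (hag : agree u (v.drop j) = true) : False := by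
  by_cases hcase : cp < v.length - j
  · have h := agree_getD u (v.drop j) hag cp hcp (by simp; omega)
    rw [getD_drop v j cp (by omega)] at h
    apply hvC
    rw [← h.symm.trans hC]
    exact getD_mem v (j + cp) (by omega)
  · have hi0 : v.length - 1 - j < cp := by omega
    have h := agree_getD u (v.drop j) hag (v.length - 1 - j) (by omega) (by simp; omega)
    rw [getD_drop v j (v.length - 1 - j) (by omega)] at h
    have hjj : j + (v.length - 1 - j) = v.length - 1 := by omega
    rw [hjj] at h
    exact hpred _ hi0 (h ▸ hvlast)

-- ---------- shape of the table entries ----------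

theorem rows_len : ∀ r ∈ pvRowsB, r.length = 2 := by decide
theorem rows_digit : ∀ r ∈ pvRowsB, ∀ i, i < 2 → (r.getD i ' ').isDigit := by decide
theorem rows_noC : ∀ r ∈ pvRowsB, 'C' ∉ r := by decide
theorem rows_noIq : ∀ r ∈ pvRowsB, ∀ i, i < 2 → r.getD i ' ' ≠ 'I' ∧ r.getD i ' ' ≠ '\'' := by
  decide

theorem pvPats_shape (tc : List Char) (p : List Char × List Char) (hp : p ∈ pvPatsB tc) :
    ∃ q d r, (q = [] ∨ q = ['\'']) ∧ (d = [] ∨ d = ['$']) ∧ r ∈ pvRowsB ∧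
      p.1 = (q ++ "Inputs".toList ++ q ++ ['!'] ++ d) ++ 'C' :: (d ++ r) ∧
      p.2 = (q ++ "Inputs".toList ++ q ++ ['!'] ++ d) ++ tc ++ (d ++ r) := by
  simp only [pvPatsB, List.mem_flatMap, List.mem_map, List.mem_cons, List.mem_singleton,
    List.not_mem_nil, or_false] at hp
  obtain ⟨q, hq, d, hd, r, hr, hp⟩ := hp
  refine ⟨q, d, r, ?_, ?_, hr, ?_, ?_⟩
  · exact hq
  · exact hd
  · rw [← hp]; simp
  · rw [← hp]; simp

-- facts about the literal prefix q ++ "Inputs" ++ q ++ "!" ++ d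
theorem pref_facts (q d : List Char) (hq : q = [] ∨ q = ['\'']) (hd : d = [] ∨ d = ['$']) :
    (∀ i, i < (q ++ "Inputs".toList ++ q ++ ['!'] ++ d).length →
       ¬ ((q ++ "Inputs".toList ++ q ++ ['!'] ++ d).getD i ' ').isDigit ∧
       (q ++ "Inputs".toList ++ q ++ ['!'] ++ d).getD i ' ' ≠ 'C') ∧
    'C' ∉ (q ++ "Inputs".toList ++ q ++ ['!'] ++ d) ∧
    ((q ++ "Inputs".toList ++ q ++ ['!'] ++ d).getD 0 ' ' = 'I' ∨
     (q ++ "Inputs".toList ++ q ++ ['!'] ++ d).getD 0 ' ' = '\'') ∧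
    0 < (q ++ "Inputs".toList ++ q ++ ['!'] ++ d).length := by
  rcases hq with rfl | rfl <;> rcases hd with rfl | rfl <;> decide

-- the suffix after 'C' contains only '$' and digits
theorem suf_facts (d r : List Char) (hd : d = [] ∨ d = ['$']) (hr : r ∈ pvRowsB) :
    ∀ i, i < (d ++ r).length →
      (d ++ r).getD i ' ' ≠ 'I' ∧ (d ++ r).getD i ' ' ≠ '\'' := by
  intro i hi
  have hrlen := rows_len r hr
  rcases hd with rfl | rfl
  · simp only [List.nil_append] at hi ⊢
    exact rows_noIq r hr i (by omega)
  · cases i with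
    | zero => refine ⟨?_, ?_⟩ <;> simp
    | succ n =>
      have : (['$'] ++ r).getD (n + 1) ' ' = r.getD n ' ' := by
        have := getD_append_right ['$'] r n (by simp at hi; omega)
        simpa [Nat.add_comm] using this
      rw [this]
      exact rows_noIq r hr n (by simp at hi; omega)

-- packaged facts about a table entry (given 'C' ∉ tc)
theorem entry_facts (tc : List Char) (htc : 'C' ∉ tc) (p : List Char × List Char)
    (hp : p ∈ pvPatsB tc) :
    ∃ cp, cp < p.1.length ∧ p.1.getD cp ' ' = 'C' ∧
      (∀ i, i < cp → ¬ (p.1.getD i ' ').isDigit) ∧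
      (∀ n, cp < n → n < p.1.length → p.1.getD n ' ' ≠ 'I' ∧ p.1.getD n ' ' ≠ '\'') ∧
      'C' ∉ p.2 ∧ (p.2.getD (p.2.length - 1) ' ').isDigit ∧
      (p.2.getD 0 ' ' = 'I' ∨ p.2.getD 0 ' ' = '\'') ∧ 0 < p.2.length := by
  obtain ⟨q, d, r, hq, hd, hr, h1, h2⟩ := pvPats_shape tc p hp
  set pref := q ++ "Inputs".toList ++ q ++ ['!'] ++ d with hpref
  obtain ⟨hprefD, hprefC, hprefH, hprefL⟩ := pref_facts q d hq hd
  have hrlen := rows_len r hr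
  refine ⟨pref.length, ?_, ?_, ?_, ?_, ?_, ?_, ?_, ?_⟩
  · rw [h1]; simp
  · rw [h1]; exact getD_append_self pref 'C' (d ++ r)
  · intro i hi
    rw [h1, getD_append_left pref _ i hi]
    exact (hprefD i hi).1
  · intro n hcn hnl
    rw [h1] at hnl ⊢
    have hsplit : pref ++ 'C' :: (d ++ r) = (pref ++ ['C']) ++ (d ++ r) := by simp
    rw [hsplit]
    have hn' : n = (pref ++ ['C']).length + (n - pref.length - 1) := by simp; omega
    rw [hn', getD_append_right]
    · exact suf_facts d r hd hr _ (by simp at hnl ⊢; omega)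
    · simp at hnl ⊢; omega
  · rw [h2]
    intro hmem
    rcases List.mem_append.mp hmem with h | h
    · rcases List.mem_append.mp h with h | h
      · exact hprefC h
      · exact htc h
    · rcases List.mem_append.mp h with h | h
      · rcases hd with rfl | rfl
        · cases h
        · simp at h
      · exact rows_noC r hr h
  · rw [h2]
    have : pref ++ tc ++ (d ++ r) = (pref ++ tc ++ d) ++ r := by simp
    rw [this]
    have hlen : ((pref ++ tc ++ d) ++ r).length - 1 = (pref ++ tc ++ d).length + 1 := by
      simp [hrlen]; omega
    rw [hlen, getD_append_right _ _ 1 (by omega)]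
    exact rows_digit r hr 1 (by omega)
  · rw [h2]
    have : (pref ++ tc ++ (d ++ r)).getD 0 ' ' = pref.getD 0 ' ' := by
      have := getD_append_left pref (tc ++ (d ++ r)) 0 hprefL
      simpa using this
    rw [this]; exact hprefH
  · rw [h2]; simp [hprefL]; omega

-- ---------- no pattern starts inside a replacement, or inside another pattern ----------

theorem rep_no_start (tc : List Char) (htc : 'C' ∉ tc) (p pk : List Char × List Char)
    (hp : p ∈ pvPatsB tc) (hpk : pk ∈ pvPatsB tc) (j : Nat) (hj : j < p.2.length) :
    agree pk.1 (p.2.drop j) = false := by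
  obtain ⟨cp, hcp, hC, hpred, -, -, -, -, -⟩ := entry_facts tc htc pk hpk
  obtain ⟨-, -, -, -, -, hvC, hvlast, -, -⟩ := entry_facts tc htc p hp
  cases h : agree pk.1 (p.2.drop j) with
  | true => exact absurd (core_mismatch pk.1 p.2 cp hcp hC hpred hvC hvlast j hj h) id
  | false => rfl

theorem rep_no_start_mid (tc : List Char) (htc : 'C' ∉ tc) (p pk : List Char × List Char)
    (hp : p ∈ pvPatsB tc) (hpk : pk ∈ pvPatsB tc) (n : Nat) (h0 : 0 < n)
    (hn : n < pk.1.length) : agree (pk.1.drop n) p.2 = false := by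
  obtain ⟨cp, hcp, hC, hpred, hsuf, -, -, -, -⟩ := entry_facts tc htc pk hpk
  obtain ⟨-, -, -, -, -, hvC, hvlast, hvhead, hvpos⟩ := entry_facts tc htc p hp
  cases h : agree (pk.1.drop n) p.2 with
  | false => rfl
  | true =>
    exfalso
    by_cases hcn : n ≤ cp
    · have hdj : p.2.drop 0 = p.2 := by simp
      refine core_mismatch (pk.1.drop n) p.2 (cp - n) (by simp; omega) ?_ ?_ hvC hvlast 0
        (by omega) (by rwa [hdj])
      · rw [getD_drop pk.1 n (cp - n) (by omega)]
        rwa [Nat.add_sub_cancel' hcn]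
      · intro i hi
        rw [getD_drop pk.1 n i (by omega)]
        exact hpred (n + i) (by omega)
    · have hhead := prefix_head_eq (pk.1.drop n) p.2 h (by simp; omega) hvpos
      rw [getD_drop pk.1 n 0 (by omega), Nat.add_zero] at hhead
      have := hsuf n (by omega) hn
      rcases hvhead with hv | hv <;> rw [hv] at hhead
      · exact this.1 hhead
      · exact this.2 hhead

-- ---------- block decomposition of the scan ----------

inductive PvBlk : Type where
  | chr : Char → PvBlk
  | hit : List Char → List Char → PvBlk

def renderO : List PvBlk → List Char
  | [] => []
  | .chr c :: bs => c :: renderO bs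
  | .hit pa _ :: bs => pa ++ renderO bs

def renderM (done : List (List Char × List Char)) : List PvBlk → List Char
  | [] => []
  | .chr c :: bs => c :: renderM done bs
  | .hit pa re :: bs => (if (pa, re) ∈ done then re else pa) ++ renderM done bs

def renderB : List PvBlk → List Char
  | [] => []
  | .chr c :: bs => c :: renderB bs
  | .hit _ re :: bs => re ++ renderB bs

def seg (tc : List Char) (s : List Char) : List PvBlk :=
  match s with
  | [] => []
  | c :: t =>
    if c = 'I' ∨ c = '\'' then
      match h : (pvPatsB tc).find? (fun p => p.1.isPrefixOf (c :: t)) with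
      | some p => .hit p.1 p.2 :: seg tc ((c :: t).drop p.1.length)
      | none => .chr c :: seg tc t
    else .chr c :: seg tc t
termination_by s.length
decreasing_by
  · have := pvPatsB_fst_pos tc p (List.mem_of_find?_eq_some h)
    simp; omega
  · simp
  · simp

-- a position whose char is not 'I' or a quote matches no pattern
theorem find?_none_of_head (tc : List Char) (c : Char) (l : List Char)
    (hc : ¬(c = 'I' ∨ c = '\'')) :
    (pvPatsB tc).find? (fun p => p.1.isPrefixOf (c :: l)) = none := by
  rw [List.find?_eq_none]
  intro p hp hpre
  rw [List.isPrefixOf_iff_prefix] at hpre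
  have hpos := pvPatsB_fst_pos tc p hp
  have hhd : p.1.getD 0 ' ' = c := by
    obtain ⟨x, xs, hx⟩ : ∃ x xs, p.1 = x :: xs := by
      cases hq : p.1 with
      | nil => rw [hq] at hpos; simp at hpos
      | cons x xs => exact ⟨x, xs, rfl⟩
    rw [hx] at hpre ⊢
    obtain ⟨h1, -⟩ := List.cons_prefix_cons.mp hpre
    simpa using h1
  have := patList_head p.1 (fst_mem_patList hp)
  rw [hhd] at this
  exact hc this

def goodB (tc : List Char) : List PvBlk → Prop
  | [] => True
  | .chr c :: bs => ((pvPatsB tc).find? (fun p => p.1.isPrefixOf (c :: renderO bs)) = none) ∧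
      goodB tc bs
  | .hit pa re :: bs => (pa, re) ∈ pvPatsB tc ∧ goodB tc bs

theorem renderO_seg (tc s : List Char) : renderO (seg tc s) = s := by
  fun_induction seg tc s with
  | case1 => rfl
  | case4 c t hc ih => simp only [renderO, ih]
  | case2 c t hc p h ih =>
    have hpre : p.1 <+: (c :: t) := by
      have := List.find?_some h
      rwa [List.isPrefixOf_iff_prefix] at this
    obtain ⟨t', ht'⟩ := hpre
    have hdp : List.drop p.1.length (c :: t) = t' := by
      rw [← ht']; exact List.drop_left
    simp only [renderO]
    rw [hdp] at ih ⊢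
    rw [ih]
    exact ht'
  | case3 c t hc h ih => simp only [renderO, ih]

theorem scan_renderB (tc s : List Char) : pvScanB tc s = renderB (seg tc s) := by
  fun_induction seg tc s with
  | case1 => rw [pvScanB]; rfl
  | case2 c t hc p h ih =>
    rw [pvScanB, if_pos hc]
    split
    · rename_i p' h'
      have hpp : p' = p := by
        have := h'.symm.trans h
        exact Option.some.inj this
      subst hpp
      simp only [renderB, ih]
    · rename_i h'
      rw [h] at h'; cases h'
  | case3 c t hc h ih =>
    rw [pvScanB, if_pos hc]
    split
    · rename_i p' h'
      rw [h] at h'; cases h'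
    · simp only [renderB, ih]
  | case4 c t hc ih =>
    rw [pvScanB, if_neg hc]
    simp only [renderB, ih]

theorem seg_good (tc s : List Char) : goodB tc (seg tc s) := by
  fun_induction seg tc s with
  | case1 => trivial
  | case2 c t hc p h ih => exact ⟨List.mem_of_find?_eq_some h, ih⟩
  | case3 c t hc h ih =>
    refine ⟨?_, ih⟩
    rw [renderO_seg]
    exact h
  | case4 c t hc ih =>
    exact ⟨find?_none_of_head tc c (renderO (seg tc t)) hc, ih⟩

theorem goodB_hits (tc : List Char) (bs : List PvBlk) (hg : goodB tc bs) :
    ∀ pa re, PvBlk.hit pa re ∈ bs → (pa, re) ∈ pvPatsB tc := by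
  induction bs with
  | nil => intro pa re h; cases h
  | cons b bs ih =>
    intro pa re h
    cases b with
    | chr c =>
      rcases List.mem_cons.mp h with h | h
      · cases h
      · exact ih hg.2 pa re h
    | hit pa' re' =>
      rcases List.mem_cons.mp h with h | h
      · cases h; exact hg.1
      · exact ih hg.2 pa re h

-- ---------- the walk lemma: a pattern occurrence in the partially replaced string
--            is already an occurrence in the original string ----------

theorem walk (tc : List Char) (htc : 'C' ∉ tc) (pk : List Char × List Char)
    (hpk : pk ∈ pvPatsB tc) (done : List (List Char × List Char))
    (hdone : ∀ p ∈ done, p ∈ pvPatsB tc) :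
    ∀ bs : List PvBlk, (∀ pa re, PvBlk.hit pa re ∈ bs → (pa, re) ∈ pvPatsB tc) →
      ∀ n, n < pk.1.length → pk.1.drop n <+: renderM done bs → pk.1.drop n <+: renderO bs := by
  intro bs
  induction bs with
  | nil =>
    intro _ n hn hpre
    have : pk.1.drop n = [] := List.prefix_nil.mp hpre
    have : pk.1.length - n = 0 := by rw [← List.length_drop, this]; rfl
    omega
  | cons b bs ih =>
    intro hm n hn hpre
    have hm' : ∀ pa re, PvBlk.hit pa re ∈ bs → (pa, re) ∈ pvPatsB tc := by
      intro pa re h; exact hm pa re (List.mem_cons_of_mem b h)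
    cases b with
    | chr c =>
      rw [drop_eq_getD_cons pk.1 n hn] at hpre ⊢
      simp only [renderM] at hpre
      obtain ⟨hhd, htl⟩ := List.cons_prefix_cons.mp hpre
      by_cases hlast : n + 1 < pk.1.length
      · rw [← drop_eq_getD_cons pk.1 n hn] at *
        rw [drop_eq_getD_cons pk.1 n hn]
        simp only [renderO]
        refine List.cons_prefix_cons.mpr ⟨hhd, ?_⟩
        have := ih hm' (n + 1) hlast (by rw [drop_eq_getD_cons pk.1 n hn] at hpre; exact
          (List.cons_prefix_cons.mp hpre).2)
        exact this
      · have hnil : pk.1.drop (n + 1) = [] := List.drop_eq_nil_of_le (by omega)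
        rw [hnil]
        simp only [renderO]
        exact List.cons_prefix_cons.mpr ⟨hhd, List.nil_prefix⟩
    | hit pa re =>
      have hpmem : (pa, re) ∈ pvPatsB tc := hm pa re List.mem_cons_self
      simp only [renderM] at hpre
      by_cases hd : (pa, re) ∈ done
      · rw [if_pos hd] at hpre
        have hagr := agree_of_prefix_append _ _ _ hpre
        exfalso
        rcases Nat.eq_zero_or_pos n with rfl | hpos
        · have hz := rep_no_start tc htc (pa, re) pk hpmem hpk 0
            (by obtain ⟨-, -, -, -, -, -, -, -, h⟩ := entry_facts tc htc (pa, re) hpmem; omega)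
          simp only [List.drop_zero] at hz hagr
          rw [hz] at hagr; cases hagr
        · have hz := rep_no_start_mid tc htc (pa, re) pk hpmem hpk n hpos hn
          rw [hz] at hagr; cases hagr
      · rw [if_neg hd] at hpre
        have hagr := agree_of_prefix_append _ _ _ hpre
        have hpa : pa ∈ patList := fst_mem_patList hpmem
        have hpk1 : pk.1 ∈ patList := fst_mem_patList hpk
        rcases Nat.eq_zero_or_pos n with rfl | hpos
        · by_cases heq : pk.1 = pa
          · simp only [renderO, List.drop_zero, heq]
            exact List.prefix_append pa (renderO bs)
          · exfalso
            have hz := NS pk.1 pa hpk1 hpa 0 (patList_ne_nil pa hpa) (by tauto)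
            simp only [List.drop_zero] at hz hagr
            rw [hz] at hagr; cases hagr
        · exfalso
          have hhead := prefix_head_eq (pk.1.drop n) pa hagr (by simp; omega)
            (patList_ne_nil pa hpa)
          rw [getD_drop pk.1 n 0 (by omega), Nat.add_zero] at hhead
          have hI : pk.1.getD n ' ' = 'I' ∨ pk.1.getD n ' ' = '\'' := by
            rw [hhead]; exact patList_head pa hpa
          have := WT pk.1 pa hpk1 hpa n hpos hn hI
          rw [this] at hagr; cases hagr

-- ---------- one pass of repl1 over the partially replaced rendering ----------

theorem fst_inj_pvPats (tc : List Char) (p p' : List Char × List Char)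
    (hp : p ∈ pvPatsB tc) (hp' : p' ∈ pvPatsB tc) (h : p.1 = p'.1) : p = p' := by
  have hnodup : ((pvPatsB tc).map Prod.fst).Nodup := by
    rw [map_fst_pvPatsB]; exact patList_nodup
  exact List.inj_on_of_nodup_map hnodup hp hp' h

theorem pass (tc : List Char) (htc : 'C' ∉ tc) (pk : List Char × List Char)
    (hpk : pk ∈ pvPatsB tc) (done : List (List Char × List Char))
    (hdone : ∀ p ∈ done, p ∈ pvPatsB tc) (hnd : pk ∉ done) :
    ∀ bs : List PvBlk, goodB tc bs →
      repl1 pk.1 pk.2 (renderM done bs) = renderM (pk :: done) bs := by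
  intro bs
  induction bs with
  | nil => intro _; simp only [renderM, repl1_nil]
  | cons b bs ih =>
    intro hg
    cases b with
    | chr c =>
      obtain ⟨hfind, hg'⟩ := hg
      have hno : ¬ (pk.1 <+: (c :: renderM done bs)) := by
        intro hpre
        have hw := walk tc htc pk hpk done hdone (.chr c :: bs)
          (goodB_hits tc (.chr c :: bs) ⟨hfind, hg'⟩) 0
          (by obtain ⟨cp, hcp, -⟩ := entry_facts tc htc pk hpk; omega)
          (by simpa [renderM] using hpre)
        simp only [List.drop_zero, renderO] at hw
        have := List.find?_eq_none.mp hfind pk hpk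
        simp only [List.isPrefixOf_iff_prefix] at this
        exact this hw
      simp only [renderM]
      rw [repl1, if_neg (by simpa [List.isPrefixOf_iff_prefix] using hno), ih hg']
    | hit pa re =>
      obtain ⟨hpmem, hg'⟩ := hg
      have hppos := pvPatsB_fst_pos tc (pa, re) hpmem
      by_cases hd : (pa, re) ∈ done
      · have hd' : (pa, re) ∈ pk :: done := List.mem_cons_of_mem pk hd
        simp only [renderM, if_pos hd, if_pos hd']
        rw [repl1_skip]
        · rw [ih hg']
        · intro j hj hpre
          have hagr := agree_of_prefix_append _ _ _ hpre
          have := rep_no_start tc htc (pa, re) pk hpmem hpk j hj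
          rw [this] at hagr; cases hagr
      · by_cases hkk : (pa, re) = pk
        · have hd' : (pa, re) ∈ pk :: done := by rw [hkk]; exact List.mem_cons_self
          simp only [renderM, if_neg hd, if_pos hd']
          have hpa : pa = pk.1 := by rw [← hkk]
          have hre : re = pk.2 := by rw [← hkk]
          rw [hpa]
          rw [repl1_match pk.1 pk.2 _ (by intro h; rw [h] at hpa; subst hpa; simp at hppos)]
          rw [ih hg', hre]
        · have hd' : (pa, re) ∉ pk :: done := by
            intro h
            rcases List.mem_cons.mp h with h | h
            · exact hkk h
            · exact hd h
          simp only [renderM, if_neg hd, if_neg hd']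
          rw [repl1_skip]
          · rw [ih hg']
          · intro j hj hpre
            have hagr := agree_of_prefix_append _ _ _ hpre
            have hne : ¬ (pk.1 = pa ∧ j = 0) := by
              rintro ⟨h1, -⟩
              exact hkk (fst_inj_pvPats tc (pa, re) pk hpmem hpk h1.symm)
            have := NS pk.1 pa (fst_mem_patList hpk) (fst_mem_patList hpmem) j hj hne
            rw [this] at hagr; cases hagr

-- ---------- folding all passes ----------

theorem fold_pass (tc : List Char) (htc : 'C' ∉ tc) :
    ∀ (todo done : List (List Char × List Char)), (∀ p ∈ todo, p ∈ pvPatsB tc) →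
      (∀ p ∈ done, p ∈ pvPatsB tc) → todo.Nodup → (∀ p ∈ todo, p ∉ done) →
      ∀ bs, goodB tc bs →
        todo.foldl (fun s p => repl1 p.1 p.2 s) (renderM done bs) =
          renderM (todo.reverse ++ done) bs := by
  intro todo
  induction todo with
  | nil => intro done _ _ _ _ bs _; simp
  | cons p todo' ih =>
    intro done htodo hdone hnd hdis bs hg
    simp only [List.foldl_cons]
    rw [pass tc htc p (htodo p List.mem_cons_self) done hdone (hdis p List.mem_cons_self) bs hg]
    have := ih (p :: done)
      (fun q hq => htodo q (List.mem_cons_of_mem p hq))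
      (by intro q hq
          rcases List.mem_cons.mp hq with rfl | hq
          · exact htodo q List.mem_cons_self
          · exact hdone q hq)
      (List.Nodup.of_cons hnd)
      (by intro q hq hqin
          rcases List.mem_cons.mp hqin with rfl | hqin
          · exact (List.nodup_cons.mp hnd).1 hq
          · exact hdis q (List.mem_cons_of_mem p hq) hqin)
      bs hg
    rw [this]
    simp

theorem renderM_nil_done (bs : List PvBlk) : renderM [] bs = renderO bs := by
  induction bs with
  | nil => rfl
  | cons b bs ih => cases b <;> simp [renderM, renderO, ih]

theorem renderM_full (done : List (List Char × List Char)) (bs : List PvBlk)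
    (h : ∀ pa re, PvBlk.hit pa re ∈ bs → (pa, re) ∈ done) : renderM done bs = renderB bs := by
  induction bs with
  | nil => rfl
  | cons b bs ih =>
    cases b with
    | chr c =>
      simp only [renderM, renderB]
      rw [ih fun pa re hh => h pa re (List.mem_cons_of_mem _ hh)]
    | hit pa re =>
      simp only [renderM, renderB]
      rw [if_pos (h pa re List.mem_cons_self), ih fun pa re hh => h pa re (List.mem_cons_of_mem _ hh)]

-- ---------- bridging port A to the pass list ----------

def aRows : List Int := [20, 21, 22, 23, 24, 25, 26, 27, 28, 29, 30, 31, 32, 37, 38, 39, 40, 41, 42, 43, 44]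

def aPairs (tc : List Char) : List (List Char × List Char) :=
  aRows.flatMap fun r =>
    [("Inputs!C".toList ++ (PySem.Int.toStr r).toList,
      "Inputs!".toList ++ tc ++ (PySem.Int.toStr r).toList),
     ("Inputs!$C$".toList ++ (PySem.Int.toStr r).toList,
      "Inputs!$".toList ++ tc ++ ['$'] ++ (PySem.Int.toStr r).toList),
     ("'Inputs'!C".toList ++ (PySem.Int.toStr r).toList,
      "'Inputs'!".toList ++ tc ++ (PySem.Int.toStr r).toList),
     ("'Inputs'!$C$".toList ++ (PySem.Int.toStr r).toList,
      "'Inputs'!$".toList ++ tc ++ ['$'] ++ (PySem.Int.toStr r).toList)]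

theorem A_toList (f t : String) :
    (replace_scenario_inputs f t).toList =
      (aPairs t.toList).foldl (fun s p => repl1 p.1 p.2 s) f.toList := by
  rw [replace_scenario_inputs, aPairs, foldl_flatMap]
  apply foldl_hom String.toList aRows
  intro s r
  simp only [List.foldl_cons, List.foldl_nil]
  have hb : ∀ (x old new : String), (PySem.Str.replace x old new).toList =
      PySem.Chars.replace x.toList old.toList new.toList := by
    intro x old new; simp
  rw [hb, hb, hb, hb]
  rw [replace_eq_repl1 _ _ _ (by simp), replace_eq_repl1 _ _ _ (by simp),
    replace_eq_repl1 _ _ _ (by simp), replace_eq_repl1 _ _ _ (by simp)]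
  simp [String.toList_append]

theorem row_chars : aRows.map (fun r => (PySem.Int.toStr r).toList) = pvRowsB := by decide

theorem litI : ("Inputs" : String).toList = ['I','n','p','u','t','s'] := by decide
theorem litA1 : ("Inputs!C" : String).toList = ['I','n','p','u','t','s','!','C'] := by decide
theorem litA2 : ("Inputs!" : String).toList = ['I','n','p','u','t','s','!'] := by decide
theorem litA3 : ("Inputs!$C$" : String).toList = ['I','n','p','u','t','s','!','$','C','$'] := by decide
theorem litA4 : ("Inputs!$" : String).toList = ['I','n','p','u','t','s','!','$'] := by decide
theorem litA5 : ("'Inputs'!C" : String).toList = ['\'','I','n','p','u','t','s','\'','!','C'] := by decide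
theorem litA6 : ("'Inputs'!" : String).toList = ['\'','I','n','p','u','t','s','\'','!'] := by decide
theorem litA7 : ("'Inputs'!$C$" : String).toList = ['\'','I','n','p','u','t','s','\'','!','$','C','$'] := by decide
theorem litA8 : ("'Inputs'!$" : String).toList = ['\'','I','n','p','u','t','s','\'','!','$'] := by decide

theorem mem_aPairs_iff (tc : List Char) (p : List Char × List Char) :
    p ∈ aPairs tc ↔ p ∈ pvPatsB tc := by
  constructor
  · intro hp
    simp only [aPairs, List.mem_flatMap, List.mem_cons, List.not_mem_nil, or_false] at hp
    obtain ⟨r, hr, hp⟩ := hp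
    have hrs : (PySem.Int.toStr r).toList ∈ pvRowsB := by
      rw [← row_chars]; exact List.mem_map_of_mem hr
    simp only [pvPatsB, List.mem_flatMap, List.mem_map]
    rcases hp with rfl | rfl | rfl | rfl
    · exact ⟨[], by simp, [], by simp, _, hrs,
        by rw [Prod.mk.injEq]; constructor <;> simp [litI, litA1, litA2]⟩
    · exact ⟨[], by simp, ['$'], by simp, _, hrs,
        by rw [Prod.mk.injEq]; constructor <;> simp [litI, litA3, litA4]⟩
    · exact ⟨['\''], by simp, [], by simp, _, hrs,
        by rw [Prod.mk.injEq]; constructor <;> simp [litI, litA5, litA6]⟩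
    · exact ⟨['\''], by simp, ['$'], by simp, _, hrs,
        by rw [Prod.mk.injEq]; constructor <;> simp [litI, litA7, litA8]⟩
  · intro hp
    obtain ⟨q, d, r, hq, hd, hr, h1, h2⟩ := pvPats_shape tc p hp
    obtain ⟨ri, hri, hrrs⟩ : ∃ ri ∈ aRows, (PySem.Int.toStr ri).toList = r := by
      rw [← row_chars] at hr
      obtain ⟨ri, hri, hh⟩ := List.mem_map.mp hr
      exact ⟨ri, hri, hh⟩
    simp only [aPairs, List.mem_flatMap, List.mem_cons, List.not_mem_nil, or_false]
    refine ⟨ri, hri, ?_⟩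
    obtain ⟨p1, p2⟩ := p
    simp only at h1 h2
    subst h1 h2
    rcases hq with rfl | rfl <;> rcases hd with rfl | rfl <;>
      rw [Prod.mk.injEq, Prod.mk.injEq, Prod.mk.injEq, Prod.mk.injEq] <;> rw [← hrrs]
    · exact Or.inl ⟨by simp [litI, litA1], by simp [litI, litA2]⟩
    · exact Or.inr (Or.inl ⟨by simp [litI, litA3], by simp [litI, litA4]⟩)
    · exact Or.inr (Or.inr (Or.inl ⟨by simp [litI, litA5], by simp [litI, litA6]⟩))
    · exact Or.inr (Or.inr (Or.inr ⟨by simp [litI, litA7], by simp [litI, litA8]⟩))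

theorem aPairs_nodup (tc : List Char) : (aPairs tc).Nodup := by
  apply List.Nodup.of_map Prod.fst
  have h : (aPairs tc).map Prod.fst = (aPairs []).map Prod.fst := rfl
  rw [h]
  decide

-- ---------- main equivalence ----------

theorem main_eq (f t : String) (htc : 'C' ∉ t.toList) :
    replace_scenario_inputs f t = replace_scenario_inputs_alt f t := by
  apply String.toList_inj.mp
  rw [A_toList]
  have haltL : (replace_scenario_inputs_alt f t).toList = pvScanB t.toList f.toList := by
    rw [replace_scenario_inputs_alt]
    exact String.toList_ofList
  rw [haltL, scan_renderB]
  set tc := t.toList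
  set bs := seg tc f.toList with hbs
  have h0 : f.toList = renderM [] bs := by
    rw [renderM_nil_done, hbs, renderO_seg]
  rw [h0]
  rw [fold_pass tc htc (aPairs tc) []
    (fun p hp => (mem_aPairs_iff tc p).mp hp)
    (fun p hp => absurd hp (List.not_mem_nil))
    (aPairs_nodup tc)
    (fun p _ => List.not_mem_nil)
    bs (seg_good tc f.toList)]
  apply renderM_full
  intro pa re hh
  have := goodB_hits tc bs (seg_good tc f.toList) pa re hh
  simp only [List.append_nil, List.mem_reverse]
  exact (mem_aPairs_iff tc (pa, re)).mpr this

-- ---------- the C-free-formula case: neither program can ever match a pattern ----------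

theorem pat_has_C (tc : List Char) (p : List Char × List Char) (hp : p ∈ pvPatsB tc) :
    'C' ∈ p.1 := by
  obtain ⟨q, d, r, -, -, -, h1, -⟩ := pvPats_shape tc p hp
  rw [h1]
  exact List.mem_append_right _ List.mem_cons_self

theorem repl1_id (p r s : List Char) (hC : 'C' ∈ p) (hs : 'C' ∉ s) : repl1 p r s = s := by
  fun_induction repl1 p r s with
  | case1 => rfl
  | case2 c t hpre ih =>
    exfalso
    rw [List.isPrefixOf_iff_prefix] at hpre
    exact hs (hpre.subset hC)
  | case3 c t hpre ih =>
    rw [ih (fun h => hs (List.mem_cons_of_mem c h))]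

theorem scan_id (tc s : List Char) (hs : 'C' ∉ s) : pvScanB tc s = s := by
  fun_induction pvScanB tc s with
  | case1 => rfl
  | case2 c t hc p h ih =>
    exfalso
    have hpre := List.find?_some h
    rw [List.isPrefixOf_iff_prefix] at hpre
    exact hs (hpre.subset (pat_has_C tc p (List.mem_of_find?_eq_some h)))
  | case3 c t hc h ih =>
    rw [ih (fun hm => hs (List.mem_cons_of_mem c hm))]
  | case4 c t hc ih =>
    rw [ih (fun hm => hs (List.mem_cons_of_mem c hm))]

theorem fold_id (tc : List Char) (todo : List (List Char × List Char))
    (htodo : ∀ p ∈ todo, p ∈ pvPatsB tc) (s : List Char) (hs : 'C' ∉ s) :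
    todo.foldl (fun s p => repl1 p.1 p.2 s) s = s := by
  induction todo with
  | nil => rfl
  | cons p todo' ih =>
    simp only [List.foldl_cons]
    rw [repl1_id p.1 p.2 s (pat_has_C tc p (htodo p List.mem_cons_self)) hs]
    exact ih (fun q hq => htodo q (List.mem_cons_of_mem p hq))

theorem main_eq_noC (f t : String) (hf : 'C' ∉ f.toList) :
    replace_scenario_inputs f t = replace_scenario_inputs_alt f t := by
  apply String.toList_inj.mp
  rw [A_toList]
  rw [fold_id t.toList (aPairs t.toList) (fun p hp => (mem_aPairs_iff t.toList p).mp hp)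
    f.toList hf]
  rw [replace_scenario_inputs_alt, String.toList_ofList, scan_id t.toList f.toList hf]

-- ===== VERDICT (by name: the statement is the Claim_ definition above) =====
theorem replace_scenario_inputs_spec : Claim_equal_replace_scenario_inputs := by
  intro f t _ hpre
  show replace_scenario_inputs f t = replace_scenario_inputs_alt f t
  rcases hpre with hpre | hpre
  · exact main_eq f t hpre
  · exact main_eq_noC f t hpre
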